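-- pv_equiv track=rewrite | github.com/XiwenChen-Clemson/INF502 | PA1/PA1.py | NumberOfMatch
-- ===== SOURCE A (Python) =====
-- def Shifting(Sequence,ShiftBits):
--     NewSequence =list()
--     for i in range(ShiftBits):
--         NewSequence.append('-')
--     for i in range(len(Sequence)):
--         NewSequence.append(Sequence[i])
--
--     return ''.join(NewSequence)
--
-- def NumberOfMatch(SequenceA,SequenceB,MaxShiftBits):
--
--     ##MaxShiftBits_1 = len(SequenceB)+1
--     ##MaxShiftBits_2 = len(SequenceA)+1
--     Score_1 = list()
--     Score_2 = list()
--
--     for i in range(MaxShiftBits+1):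
--         Score_1.append(0)
--         ShiftedA = Shifting(SequenceA,i)
--         for j in range(min(len(ShiftedA),len(SequenceB))):
--             if ShiftedA[j]==SequenceB[j]:
--                     Score_1[i]=Score_1[i]+1
--     # Get the shifted string with max score by only shifting A
--     index = [i for i,j in enumerate(Score_1) if j==max(Score_1)]
--     ShiftedA = list()
--     for i in index:
--         ShiftedA.append(Shifting(SequenceA,i))
--
--     #ShiftedA = Shifting(SequenceA,Score_1.index(max(Score_1)))
--
--
--     for i in range(MaxShiftBits+1):
--         Score_2.append(0)
--         ShiftedB = Shifting(SequenceB,i)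
--         for j in range(min(len(ShiftedB),len(SequenceA))):
--             if ShiftedB[j]==SequenceA[j]:
--                     Score_2[i]=Score_2[i]+1
--     # Get the shifted string with max score by only shifting A
--     # Find the location of max score_2
--     index = [i for i,j in enumerate(Score_2) if j==max(Score_2)]
--     ShiftedB = list()
--     for i in index:
--         ShiftedB.append(Shifting(SequenceB,i))
--
--     #ShiftedB = Shifting(SequenceB,Score_2.index(max(Score_2)))
--
--
--     if max(Score_1)>max(Score_2):
--         ShiftedA = ShiftedA
--         ShiftedB = []
--         ShiftedB.append(SequenceB)
--     else:
--         ShiftedA = []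
--         ShiftedA.append(SequenceA)
--         ShiftedB = ShiftedB
--
--
--     Score = max(max(Score_1),max(Score_2))
--
--     return Score, ShiftedA, ShiftedB
-- ===== SOURCE B (Python) =====
-- def NumberOfMatch(SequenceA, SequenceB, MaxShiftBits):
--     def shift_scores(S, T):
--         # Cross-correlation by a character-position index: one pass over T builds
--         # pos[c] = positions of c in T; one pass over S credits each equal-character
--         # pair (S[p], T[j]) to shift d = j - p; finally the '-' padding introduced by
--         # shift d matches the dashes in T's first d characters (running prefix count).
--         pos = {}
--         for j, c in enumerate(T):
--             pos.setdefault(c, []).append(j)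
--         score = [0] * (MaxShiftBits + 1)
--         for p, c in enumerate(S):
--             for j in pos.get(c, []):
--                 d = j - p
--                 if 0 <= d <= MaxShiftBits:
--                     score[d] += 1
--         dashes = 0
--         for d in range(1, MaxShiftBits + 1):
--             if d - 1 < len(T) and T[d - 1] == '-':
--                 dashes += 1
--             score[d] += dashes
--         return score
--     s1 = shift_scores(SequenceA, SequenceB)
--     s2 = shift_scores(SequenceB, SequenceA)
--     m1, m2 = max(s1), max(s2)
--     if m1 > m2:
--         return m1, ['-' * i + SequenceA for i, v in enumerate(s1) if v == m1], [SequenceB]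
--     return m2, [SequenceA], ['-' * i + SequenceB for i, v in enumerate(s2) if v == m2]
-- ===== Notes on version B (the rewrite author's own statement) =====
-- stated objective: faster
-- what changed: Scoring is done by a character-position-index cross-correlation: one pass builds a dict of each character's positions in the other string, one pass over the sequence credits every equal-character pair to its shift bucket, and a running prefix '-' counter adds the padding matches, instead of materialising a shifted string per shift and rescanning it position by position.
import Mathlib
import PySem

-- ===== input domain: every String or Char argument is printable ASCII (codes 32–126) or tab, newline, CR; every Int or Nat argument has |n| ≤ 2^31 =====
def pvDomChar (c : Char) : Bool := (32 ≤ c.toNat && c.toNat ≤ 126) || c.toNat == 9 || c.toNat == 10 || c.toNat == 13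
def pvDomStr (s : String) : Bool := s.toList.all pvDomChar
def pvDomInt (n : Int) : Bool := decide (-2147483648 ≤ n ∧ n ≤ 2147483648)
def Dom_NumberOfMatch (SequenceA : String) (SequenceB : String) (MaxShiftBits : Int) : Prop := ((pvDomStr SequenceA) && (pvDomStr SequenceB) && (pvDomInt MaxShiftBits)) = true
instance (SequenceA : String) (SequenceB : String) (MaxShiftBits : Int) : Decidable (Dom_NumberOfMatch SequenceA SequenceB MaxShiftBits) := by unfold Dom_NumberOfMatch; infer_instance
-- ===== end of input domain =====

-- B replaces A's per-shift rescan by a character-position-index cross-correlation: one dict pass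
-- over each string credits every equal-character pair to its shift, plus a running prefix '-' count.


-- ===== PORT A =====
-- Shifting(Sequence, ShiftBits): append ShiftBits '-' characters, then the sequence's characters
def pvShift (s : List Char) (k : Int) : List Char :=
  let ns := (PySem.List.pyRange 0 k 1).foldl (fun acc _ => acc ++ ['-']) ([] : List Char)
  (PySem.List.pyRange 0 (PySem.List.len s) 1).foldl
    (fun acc i => acc ++ [PySem.List.pyGetD s i ' ']) ns

-- A's inner scoring loop: index walk over min of the two lengths, incrementing on equal characters
def pvScoreRow (u v : List Char) : Int :=
  (PySem.List.pyRange 0 (min (PySem.List.len u) (PySem.List.len v)) 1).foldl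
    (fun sc j => if PySem.List.pyGetD u j ' ' = PySem.List.pyGetD v j ' ' then sc + 1 else sc) 0

def NumberOfMatch (SequenceA : String) (SequenceB : String) (MaxShiftBits : Int) : Int × List String × List String :=
  let a := SequenceA.toList
  let b := SequenceB.toList
  let score1 := (PySem.List.pyRange 0 (MaxShiftBits + 1) 1).foldl
    (fun acc i => acc ++ [pvScoreRow (pvShift a i) b]) ([] : List Int)
  let m1 := (PySem.List.max? score1 (fun y => y)).getD 0
  let idx1 := ((PySem.List.enumerate score1 0).filter (fun p => decide (p.2 = m1))).map (·.1)
  let shiftedA := idx1.foldl (fun acc i => acc ++ [String.ofList (pvShift a i)]) ([] : List String)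
  let score2 := (PySem.List.pyRange 0 (MaxShiftBits + 1) 1).foldl
    (fun acc i => acc ++ [pvScoreRow (pvShift b i) a]) ([] : List Int)
  let m2 := (PySem.List.max? score2 (fun y => y)).getD 0
  let idx2 := ((PySem.List.enumerate score2 0).filter (fun p => decide (p.2 = m2))).map (·.1)
  let shiftedB := idx2.foldl (fun acc i => acc ++ [String.ofList (pvShift b i)]) ([] : List String)
  if m1 > m2 then (max m1 m2, shiftedA, [SequenceB])
  else (max m1 m2, [SequenceA], shiftedB)

-- ===== PORT B =====
-- pos = {}; for j, c in enumerate(T): pos.setdefault(c, []).append(j)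
def pvBuildPos (T : List Char) : PySem.Dict Char (List Int) :=
  (PySem.List.enumerate T 0).foldl (fun d q => d.modify q.2 [] (· ++ [q.1])) PySem.Dict.empty

-- score[d] += 1
def pvBump (sc : List Int) (d : Int) : List Int :=
  PySem.List.pySetD sc d (PySem.List.pyGetD sc d 0 + 1)

-- shift_scores(S, T) of Source B: position-index correlation, then the running prefix '-' count
def pvShiftScores (S T : List Char) (K : Int) : List Int :=
  let pos := pvBuildPos T
  let score0 := PySem.List.pyRepeat [(0 : Int)] (K + 1)
  let score1 := (PySem.List.enumerate S 0).foldl (fun sc q =>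
      (pos.getD q.2 []).foldl (fun sc j =>
        if 0 ≤ j - q.1 ∧ j - q.1 ≤ K then pvBump sc (j - q.1) else sc) sc) score0
  ((PySem.List.pyRange 1 (K + 1) 1).foldl (fun (st : List Int × Int) d =>
      let dashes := if d - 1 < PySem.List.len T ∧ PySem.List.pyGetD T (d - 1) ' ' = '-'
                    then st.2 + 1 else st.2
      (PySem.List.pySetD st.1 d (PySem.List.pyGetD st.1 d 0 + dashes), dashes)) (score1, 0)).1

def NumberOfMatch_alt (SequenceA : String) (SequenceB : String) (MaxShiftBits : Int) : Int × List String × List String :=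
  let s1 := pvShiftScores SequenceA.toList SequenceB.toList MaxShiftBits
  let s2 := pvShiftScores SequenceB.toList SequenceA.toList MaxShiftBits
  let m1 := (PySem.List.max? s1 (fun y => y)).getD 0
  let m2 := (PySem.List.max? s2 (fun y => y)).getD 0
  if m1 > m2 then
    (m1, (PySem.List.enumerate s1 0).filterMap (fun p =>
        if p.2 = m1 then some (String.ofList (List.replicate p.1.toNat '-' ++ SequenceA.toList)) else none),
     [SequenceB])
  else
    (m2, [SequenceA],
     (PySem.List.enumerate s2 0).filterMap (fun p =>
        if p.2 = m2 then some (String.ofList (List.replicate p.1.toNat '-' ++ SequenceB.toList)) else none))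

-- ===== PRECONDITION & SPEC =====
-- Pre_ excludes MaxShiftBits < 0, where A raises ValueError (max() of an empty list); B raises there too.
def Pre_NumberOfMatch (SequenceA : String) (SequenceB : String) (MaxShiftBits : Int) : Prop :=
  0 ≤ MaxShiftBits
instance (SequenceA : String) (SequenceB : String) (MaxShiftBits : Int) : Decidable (Pre_NumberOfMatch SequenceA SequenceB MaxShiftBits) := by unfold Pre_NumberOfMatch; infer_instance
def pvWitness_NumberOfMatch : String × String × Int := ("ab-", "-ab", 2)

def Spec_NumberOfMatch (SequenceA : String) (SequenceB : String) (MaxShiftBits : Int) (out : Int × List String × List String) : Prop := out = NumberOfMatch_alt SequenceA SequenceB MaxShiftBits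
instance (SequenceA : String) (SequenceB : String) (MaxShiftBits : Int) (out : Int × List String × List String) : Decidable (Spec_NumberOfMatch SequenceA SequenceB MaxShiftBits out) := by unfold Spec_NumberOfMatch; infer_instance

-- ===== CLAIM (what is proved, stated in full; the proofs are below) =====
def Claim_equal_NumberOfMatch : Prop := ∀ (SequenceA : String) (SequenceB : String) (MaxShiftBits : Int), Dom_NumberOfMatch SequenceA SequenceB MaxShiftBits → Pre_NumberOfMatch SequenceA SequenceB MaxShiftBits → Spec_NumberOfMatch SequenceA SequenceB MaxShiftBits (NumberOfMatch SequenceA SequenceB MaxShiftBits)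

-- ===== LEMMAS AND PROOFS =====

-- the common value of shift i's score: dashes in T's first i characters + zip match of S with T[i:]
def pvRow (S T : List Char) (i : Nat) : Int :=
  ((T.take i).countP (fun c => decide (c = '-')) : Int)
  + ((S.zip (T.drop i)).countP (fun p => decide (p.1 = p.2)) : Int)

-- pvShift is '-'-padding followed by the sequence
theorem pvShift_eq (s : List Char) (k : Int) :
    pvShift s k = List.replicate k.toNat '-' ++ s := by
  unfold pvShift
  have h1 : (PySem.List.pyRange 0 k 1).foldl (fun acc _ => acc ++ ['-']) ([] : List Char)
      = List.replicate k.toNat '-' := by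
    rw [PySem.List.foldl_append_singleton_eq_map]
    simp [PySem.List.length_pyRange_one]
  simp only [h1, PySem.List.len_eq]
  rw [PySem.List.foldl_pyRange_zero_pyGetD' s ' ' (fun acc c => acc ++ [c])]
  rw [PySem.List.foldl_append_singleton_eq_self]

-- the index-walk match count is the zip match count
theorem countP_range_zip (u v : List Char) :
    (List.range (min u.length v.length)).countP
      (fun j => decide (u.getD j ' ' = v.getD j ' '))
    = (u.zip v).countP (fun p => decide (p.1 = p.2)) := by
  induction u generalizing v with
  | nil => simp
  | cons c u' ih =>
    cases v with
    | nil => simp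
    | cons d v' =>
      have hmin : min (c :: u').length (d :: v').length = min u'.length v'.length + 1 := by
        simp only [List.length_cons]; omega
      rw [hmin, List.range_succ_eq_map]
      simp only [List.countP_cons, List.countP_map, List.zip_cons_cons]
      rw [← ih v']
      simp [Function.comp_def]
      rfl

-- zipping against a '-'-padded list splits into a prefix '-'-count and a suffix zip count
theorem countP_zip_replicate (t : Nat) (a b : List Char) :
    ((List.replicate t '-' ++ a).zip b).countP (fun p => decide (p.1 = p.2))
    = (b.take t).countP (fun c => decide (c = '-'))
      + ((a.zip (b.drop t)).countP (fun p => decide (p.1 = p.2))) := by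
  induction t generalizing b with
  | zero => simp
  | succ t ih =>
    cases b with
    | nil => simp
    | cons d b' =>
      simp only [List.replicate_succ, List.cons_append, List.zip_cons_cons,
        List.countP_cons, List.take_succ_cons, List.drop_succ_cons, ih b']
      simp [eq_comm]
      omega

-- A's per-shift score is the common row value
theorem scoreRow_eq (a b : List Char) (i : Int) (hi : 0 ≤ i) :
    pvScoreRow (pvShift a i) b = pvRow a b i.toNat := by
  rw [pvShift_eq]
  unfold pvScoreRow pvRow
  simp only [PySem.List.len_eq]
  rw [PySem.List.foldl_ite_add_one
    (fun j => PySem.List.pyGetD (List.replicate i.toNat '-' ++ a) j ' ' = PySem.List.pyGetD b j ' ')]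
  rw [show min (((List.replicate i.toNat '-' ++ a).length : Int)) ((b.length : Int))
      = ((min (List.replicate i.toNat '-' ++ a).length b.length : Nat) : Int) by
    rw [Nat.cast_min]]
  rw [PySem.List.pyRange_zero_nat]
  rw [List.countP_map]
  simp only [Function.comp_def, PySem.List.pyGetD_natCast]
  rw [countP_range_zip (List.replicate i.toNat '-' ++ a) b, countP_zip_replicate i.toNat a b]
  push_cast
  ring

-- A's appended score list is the row map
theorem scoreList_eq (a b : List Char) (M : Int) :
    (PySem.List.pyRange 0 (M + 1) 1).foldl
      (fun acc i => acc ++ [pvScoreRow (pvShift a i) b]) ([] : List Int)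
    = (List.range (M + 1).toNat).map (fun k => pvRow a b k) := by
  rw [PySem.List.foldl_append_singleton_eq_map, List.nil_append, PySem.List.pyRange_one,
    List.map_map]
  simp only [Int.sub_zero]
  refine List.map_congr_left ?_
  intro k _
  simp only [Function.comp_def, Int.zero_add]
  rw [scoreRow_eq a b k (by positivity)]
  simp

-- a filterMap with an if-guard is map-after-filter
theorem pvFilterMap_if {α β : Type} (l : List α) (q : α → Prop) [DecidablePred q] (g : α → β) :
    l.filterMap (fun p => if q p then some (g p) else none)
    = ((l.filter (fun p => decide (q p))).map g) := by
  induction l with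
  | nil => rfl
  | cons x t ih => by_cases h : q x <;> simp [h, ih]

-- A's filter-then-build shifted-string list is B's filterMap
theorem shiftedList_eq (a : List Char) (s : List Int) (m : Int) :
    (((PySem.List.enumerate s 0).filter (fun p => decide (p.2 = m))).map (·.1)).foldl
      (fun acc i => acc ++ [String.ofList (pvShift a i)]) ([] : List String)
    = (PySem.List.enumerate s 0).filterMap (fun p =>
        if p.2 = m then some (String.ofList (List.replicate p.1.toNat '-' ++ a)) else none) := by
  rw [PySem.List.foldl_append_singleton_eq_map, List.nil_append, List.map_map]
  rw [pvFilterMap_if]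
  refine List.map_congr_left ?_
  intro p hp
  have hp' := List.mem_filter.mp hp |>.1
  obtain ⟨k, hk, rfl⟩ := (PySem.List.mem_enumerate_iff s 0 p).mp hp'
  simp only [Function.comp_def]
  rw [pvShift_eq]

-- ===== B-side lemmas =====
theorem setD (l : List Int) (n : Nat) (a : Int) (m : Nat) : (l.set n a).getD m 0 = if n = m ∧ n < l.length then a else l.getD m 0 := by
  simp only [List.getD, List.getElem?_set]
  split_ifs <;> simp_all <;> omega
theorem bump_getD (sc : List Int) (d : Int) (hd : 0 ≤ d) (i : Nat) :
    (pvBump sc d).getD i 0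
    = if (i : Int) = d ∧ i < sc.length then sc.getD i 0 + 1 else sc.getD i 0 := by
  obtain ⟨m, rfl⟩ : ∃ m : Nat, d = (m : Int) := ⟨d.toNat, (Int.toNat_of_nonneg hd).symm⟩
  unfold pvBump
  rw [PySem.List.pySetD_natCast, PySem.List.pyGetD_natCast, setD]
  by_cases h : m = i ∧ m < sc.length
  · obtain ⟨rfl, h2⟩ := h; simp [h2]
  · rw [if_neg h, if_neg]; rintro ⟨h1,h2⟩; exact h ⟨by exact_mod_cast h1.symm, by omega⟩
theorem bump_len (sc : List Int) (d : Int) : (pvBump sc d).length = sc.length :=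
  PySem.List.length_pySetD _ _ _

theorem inner_len (K : Int) (p : Int) (l : List Int) (sc : List Int) :
    (l.foldl (fun sc j => if 0 ≤ j - p ∧ j - p ≤ K then pvBump sc (j - p) else sc) sc).length
    = sc.length := by
  induction l generalizing sc with
  | nil => rfl
  | cons j l ih =>
    simp only [List.foldl_cons]
    rw [ih]
    split_ifs with h
    · exact bump_len _ _
    · rfl

theorem inner_getD (K : Int) (hK : 0 ≤ K) (p : Int) (l : List Int) (sc : List Int)
    (hlen : sc.length = (K + 1).toNat) (i : Nat) (hi : i < sc.length) :
    (l.foldl (fun sc j => if 0 ≤ j - p ∧ j - p ≤ K then pvBump sc (j - p) else sc) sc).getD i 0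
    = sc.getD i 0 + l.count (p + i) := by
  induction l generalizing sc with
  | nil => simp
  | cons j l ih =>
    simp only [List.foldl_cons, List.count_cons]
    by_cases hg : 0 ≤ j - p ∧ j - p ≤ K
    · rw [if_pos hg, ih (pvBump sc (j - p)) (by rw [bump_len]; exact hlen) (by rw [bump_len]; exact hi)]
      rw [bump_getD sc (j - p) hg.1 i]
      by_cases hj : p + (i : Int) = j
      · rw [if_pos ⟨by omega, hi⟩, if_pos (by simpa using hj.symm)]
        push_cast; ring
      · rw [if_neg (fun h => hj (by omega : p + (i:Int) = j)),
          if_neg (by simpa using fun h : j = p + (i:Int) => hj h.symm)]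
        push_cast; ring
    · have h1 : (i : Int) < K + 1 := by
        have : (i : Int) < ((K+1).toNat : Int) := by exact_mod_cast hi.trans_eq hlen
        omega
      have hj : ¬ (j = p + (i:Int)) := fun h => hg ⟨by omega, by omega⟩
      rw [if_neg hg, ih sc hlen hi, if_neg (by simpa using hj)]
      push_cast; ring

theorem outer_len (K : Int) (g : Char → List Int) (l : List (Int × Char)) (sc : List Int) :
    (l.foldl (fun sc q => (g q.2).foldl (fun sc j =>
        if 0 ≤ j - q.1 ∧ j - q.1 ≤ K then pvBump sc (j - q.1) else sc) sc) sc).length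
    = sc.length := by
  induction l generalizing sc with
  | nil => rfl
  | cons q l ih => rw [List.foldl_cons, ih, inner_len]

theorem outer_getD (K : Int) (hK : 0 ≤ K) (g : Char → List Int) (l : List (Int × Char))
    (sc : List Int) (hlen : sc.length = (K + 1).toNat) (i : Nat) (hi : i < sc.length) :
    (l.foldl (fun sc q => (g q.2).foldl (fun sc j =>
        if 0 ≤ j - q.1 ∧ j - q.1 ≤ K then pvBump sc (j - q.1) else sc) sc) sc).getD i 0
    = sc.getD i 0 + (l.map (fun q => (((g q.2).count (q.1 + (i : Int)) : Nat) : Int))).sum := by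
  induction l generalizing sc with
  | nil => simp
  | cons q l ih =>
    rw [List.foldl_cons, ih _ (by rw [inner_len]; exact hlen) (by rw [inner_len]; exact hi),
      inner_getD K hK q.1 (g q.2) sc hlen i hi]
    simp only [List.map_cons, List.sum_cons]
    ring

theorem pos_getD (T : List Char) :
    ∀ c, ((PySem.List.enumerate T 0).foldl (fun d q => d.modify q.2 [] (· ++ [q.1])) PySem.Dict.empty).getD c []
    = ((PySem.List.enumerate T 0).filter (fun q => q.2 == c)).map (·.1) := by
  intro c
  rw [show (PySem.List.enumerate T 0).foldl (fun d q => d.modify q.2 [] (· ++ [q.1])) PySem.Dict.empty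
      = (((PySem.List.enumerate T 0).map (fun q => (q.2, q.1))).foldl
          (fun d p => d.modify p.1 [] (· ++ [p.2])) PySem.Dict.empty) by rw [List.foldl_map]]
  rw [PySem.Dict.getD_foldl_modify_append]
  rw [List.filter_map, List.map_map]
  simp [Function.comp_def]

theorem enum_eq (S : List Char) (s : Nat) :
    PySem.List.enumerate S (s : Int)
    = (List.range S.length).map (fun k => (((s + k : Nat) : Int), S.getD k ' ')) := by
  induction S generalizing s with
  | nil => rfl
  | cons c t ih =>
    show ((s:Int), c) :: PySem.List.enumerate t ((s:Int)+1) = _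
    rw [show ((s:Int)+1) = ((s+1 : Nat) : Int) by push_cast; ring, ih (s+1)]
    simp only [List.length_cons, List.range_succ_eq_map, List.map_cons, List.map_map]
    refine congrArg₂ _ (by simp) ?_
    refine List.map_congr_left ?_
    intro k _
    simp [Nat.add_comm, Nat.add_left_comm]
theorem pos_count (T : List Char) (c : Char) (s n : Nat) :
    ((((PySem.List.enumerate T (s : Int)).filter (fun q => q.2 == c)).map (·.1)).count ((n : Int)))
    = if s ≤ n ∧ n - s < T.length ∧ T.getD (n - s) ' ' = c then 1 else 0 := by
  induction T generalizing s with
  | nil => simp [PySem.List.enumerate]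
  | cons x t ih =>
    have hcons : PySem.List.enumerate (x::t) (s:Int) = ((s:Int),x) :: PySem.List.enumerate t ((s:Int)+1) := rfl
    rw [hcons, show ((s:Int)+1) = ((s+1 : Nat) : Int) by push_cast; ring]
    by_cases hn : n = s
    · subst hn
      by_cases hx : x = c
      · subst hx
        rw [List.filter_cons_of_pos (by simp), List.map_cons, List.count_cons_self, ih (n+1)]
        rw [if_neg (by omega), if_pos ⟨le_refl n, by simp, by simp⟩]
      · rw [List.filter_cons_of_neg (by simpa using hx), ih (n+1)]
        rw [if_neg (by omega), if_neg]
        rintro ⟨-, -, h3⟩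
        simp only [Nat.sub_self, List.getD_cons_zero] at h3
        exact hx h3
    · have hcnt : ∀ l : List Int, ((s:Int) :: l).count ((n:Int)) = l.count ((n:Int)) := by
        intro l
        exact List.count_cons_of_ne (by intro h; exact hn (by exact_mod_cast h.symm))
      have hstep : (if s + 1 ≤ n ∧ n - (s+1) < t.length ∧ t.getD (n - (s+1)) ' ' = c then 1 else 0)
          = if s ≤ n ∧ n - s < (x::t).length ∧ (x::t).getD (n - s) ' ' = c then 1 else 0 := by
        by_cases hsn : s ≤ n
        · have h1 : s + 1 ≤ n := by omega
          have h2 : n - s = (n - (s+1)) + 1 := by omega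
          rw [h2]
          simp only [List.length_cons, List.getD_cons_succ]
          refine if_congr ?_ rfl rfl
          constructor
          · rintro ⟨-, a, b⟩; exact ⟨hsn, by omega, b⟩
          · rintro ⟨-, a, b⟩; exact ⟨h1, by omega, b⟩
        · rw [if_neg (by omega), if_neg (by intro h; exact hsn h.1)]
      by_cases hx : x = c
      · rw [List.filter_cons_of_pos (by simpa using hx), List.map_cons, hcnt, ih (s+1), hstep]
      · rw [List.filter_cons_of_neg (by simpa using hx), ih (s+1), hstep]
theorem corr_sum (S T : List Char) : ∀ i : Nat,
    ((List.range S.length).map (fun k =>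
        if k + i < T.length ∧ T.getD (k + i) ' ' = S.getD k ' ' then (1:Int) else 0)).sum
    = ((S.zip (T.drop i)).countP (fun p => decide (p.1 = p.2)) : Int) := by
  induction S with
  | nil => intro i; simp
  | cons c t ih =>
    intro i
    rw [List.length_cons, List.range_succ_eq_map, List.map_cons, List.sum_cons, List.map_map]
    have hmap : (List.range t.length).map ((fun k =>
          if k + i < T.length ∧ T.getD (k + i) ' ' = (c::t).getD k ' ' then (1:Int) else 0) ∘ Nat.succ)
        = (List.range t.length).map (fun k =>
          if k + (i+1) < T.length ∧ T.getD (k + (i+1)) ' ' = t.getD k ' ' then (1:Int) else 0) := by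
      refine List.map_congr_left ?_
      intro k _
      simp only [Function.comp_def, List.getD_cons_succ]
      rw [show Nat.succ k + i = k + (i+1) by omega]
    rw [hmap, ih (i+1)]
    by_cases hi : i < T.length
    · rw [List.drop_eq_getElem_cons hi, List.zip_cons_cons, List.countP_cons]
      have h0 : (if 0 + i < T.length ∧ T.getD (0+i) ' ' = (c::t).getD 0 ' ' then (1:Int) else 0)
          = if c = T[i] then 1 else 0 := by
        simp only [Nat.zero_add, List.getD_cons_zero]
        rw [List.getD_eq_getElem T ' ' hi]
        exact if_congr ⟨fun ⟨_,h⟩ => h.symm, fun h => ⟨hi, h.symm⟩⟩ rfl rfl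
      rw [h0]
      by_cases h : c = T[i] <;> simp [h] <;> push_cast <;> ring
    · have hd : T.drop i = [] := List.drop_eq_nil_of_le (by omega)
      rw [hd]
      have h0 : (if 0 + i < T.length ∧ T.getD (0+i) ' ' = (c::t).getD 0 ' ' then (1:Int) else 0) = 0 := by
        rw [if_neg]; rintro ⟨h1,-⟩; omega
      have hd1 : T.drop (i+1) = [] := List.drop_eq_nil_of_le (by omega)
      rw [h0, hd1]
      simp
def pvDashStep (T : List Char) (st : List Int × Int) (d : Int) : List Int × Int :=
  let dashes := if d - 1 < PySem.List.len T ∧ PySem.List.pyGetD T (d - 1) ' ' = '-'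
                then st.2 + 1 else st.2
  (PySem.List.pySetD st.1 d (PySem.List.pyGetD st.1 d 0 + dashes), dashes)

theorem countP_take_succ (T : List Char) (m : Nat) (p : Char → Bool) :
    (T.take (m+1)).countP p
    = (T.take m).countP p + if m < T.length ∧ p (T.getD m ' ') then 1 else 0 := by
  rw [List.take_add_one, List.countP_append]
  by_cases h : m < T.length
  · rw [List.getElem?_eq_getElem h]
    rw [List.getD_eq_getElem T ' ' h]
    by_cases hp : p T[m] <;> simp [hp, h]
  · rw [List.getElem?_eq_none (by omega)]
    rw [if_neg (by rintro ⟨h1,-⟩; omega)]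
    simp

theorem dash_fold (T : List Char) (sc : List Int) : ∀ m : Nat, m < sc.length →
    (((PySem.List.pyRange 1 ((m : Int) + 1) 1).foldl (pvDashStep T) (sc, 0)).1.length = sc.length)
    ∧ (((PySem.List.pyRange 1 ((m : Int) + 1) 1).foldl (pvDashStep T) (sc, 0)).2
      = ((T.take m).countP (fun c => decide (c = '-')) : Int))
    ∧ ∀ i < sc.length, ((PySem.List.pyRange 1 ((m : Int) + 1) 1).foldl (pvDashStep T) (sc, 0)).1.getD i 0
      = sc.getD i 0 + if 1 ≤ i ∧ i ≤ m then ((T.take i).countP (fun c => decide (c = '-')) : Int) else 0 := by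
  intro m
  induction m with
  | zero =>
    intro _
    rw [show ((0:Nat):Int) + 1 = 1 by norm_num, PySem.List.pyRange_one_eq_nil (le_refl 1)]
    refine ⟨rfl, by simp, ?_⟩
    intro i hi
    rw [if_neg (by omega)]
    simp
  | succ m ih =>
    intro hm1
    obtain ⟨ih1, ih2, ih3⟩ := ih (by omega)
    rw [show ((m+1:Nat):Int) + 1 = ((m:Int)+1) + 1 by push_cast; ring,
      PySem.List.pyRange_one_succ_right (by omega), List.foldl_append, List.foldl_cons, List.foldl_nil]
    set r := (PySem.List.pyRange 1 ((m : Int) + 1) 1).foldl (pvDashStep T) (sc, 0) with hr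
    simp only [pvDashStep]
    have hdash : (if ((m:Int)+1) - 1 < PySem.List.len T ∧ PySem.List.pyGetD T (((m:Int)+1) - 1) ' ' = '-'
          then r.2 + 1 else r.2)
        = ((T.take (m+1)).countP (fun c => decide (c = '-')) : Int) := by
      rw [show ((m:Int)+1) - 1 = ((m:Nat):Int) by ring]
      rw [PySem.List.pyGetD_natCast, PySem.List.len_eq, ih2, countP_take_succ]
      by_cases h : m < T.length ∧ T.getD m ' ' = '-'
      · rw [if_pos ⟨by exact_mod_cast h.1, h.2⟩, if_pos (by simpa using h)]
        push_cast; ring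
      · rw [if_neg (by rintro ⟨h1,h2⟩; exact h ⟨by exact_mod_cast h1, h2⟩),
          if_neg (by simpa using h)]
        simp
    rw [hdash, show ((m:Int)+1) = (((m+1:Nat)):Int) by push_cast; ring,
      PySem.List.pySetD_natCast, PySem.List.pyGetD_natCast]
    refine ⟨by rw [List.length_set]; exact ih1, rfl, ?_⟩
    intro i hi
    rw [setD]
    by_cases hieq : i = m + 1
    · subst hieq
      rw [if_pos ⟨rfl, by omega⟩, ih3 (m+1) hi]
      rw [if_neg (by omega), if_pos (by omega)]
      ring
    · rw [if_neg (by rintro ⟨h1,-⟩; exact hieq h1.symm), ih3 i hi]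
      by_cases hc : 1 ≤ i ∧ i ≤ m
      · rw [if_pos hc, if_pos ⟨hc.1, by omega⟩]
      · rw [if_neg hc, if_neg (by rintro ⟨h1,h2⟩; exact hc ⟨h1, by omega⟩)]

theorem shiftScores_eq (S T : List Char) (K : Int) (hK : 0 ≤ K) :
    pvShiftScores S T K = (List.range (K + 1).toNat).map (fun k => pvRow S T k) := by
  obtain ⟨KN, rfl⟩ : ∃ n : Nat, K = (n : Int) := ⟨K.toNat, (Int.toNat_of_nonneg hK).symm⟩
  have hT : ((KN:Int) + 1).toNat = KN + 1 := by omega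
  have hsc0 : PySem.List.pyRepeat [(0:Int)] ((KN:Int) + 1) = List.replicate (KN+1) 0 := by
    rw [PySem.List.pyRepeat_singleton, hT]
  -- the correlation stage, pointwise
  set score1 := (PySem.List.enumerate S 0).foldl (fun sc q =>
      ((pvBuildPos T).getD q.2 []).foldl (fun sc j =>
        if 0 ≤ j - q.1 ∧ j - q.1 ≤ (KN:Int) then pvBump sc (j - q.1) else sc) sc)
      (PySem.List.pyRepeat [(0:Int)] ((KN:Int) + 1)) with hs1
  have hlen0 : (PySem.List.pyRepeat [(0:Int)] ((KN:Int) + 1)).length = ((KN:Int) + 1).toNat := by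
    rw [hsc0, List.length_replicate, hT]
  have hlen1 : score1.length = KN + 1 := by
    rw [hs1, outer_len (KN:Int) (fun c => (pvBuildPos T).getD c []) (PySem.List.enumerate S 0) _, hlen0, hT]
  have hscore1 : ∀ i < KN + 1, score1.getD i 0
      = ((S.zip (T.drop i)).countP (fun p => decide (p.1 = p.2)) : Int) := by
    intro i hi
    rw [hs1, outer_getD (KN:Int) (by positivity) (fun c => (pvBuildPos T).getD c []) (PySem.List.enumerate S 0) _ hlen0 i (by rw [hlen0, hT]; omega)]
    rw [hsc0]
    have hz : (List.replicate (KN+1) (0:Int)).getD i 0 = 0 := by simp [List.getD]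
    rw [hz, Int.zero_add]
    have henum : PySem.List.enumerate S 0
        = (List.range S.length).map (fun k => (((k:Nat):Int), S.getD k ' ')) := by
      simpa using enum_eq S 0
    rw [henum, List.map_map]
    have hterm : ∀ k ∈ List.range S.length,
        ((fun q => (((pvBuildPos T).getD q.2 []).count (q.1 + (i : Int)) : Int)) ∘
          (fun k => (((k:Nat):Int), S.getD k ' '))) k
        = if k + i < T.length ∧ T.getD (k + i) ' ' = S.getD k ' ' then (1:Int) else 0 := by
      intro k hk
      simp only [Function.comp_def, pvBuildPos]
      rw [pos_getD, show ((k:Nat):Int) + (i:Int) = (((k+i : Nat)):Int) by push_cast; ring]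
      have h := pos_count T (S.getD k ' ') 0 (k+i)
      simp only [Nat.cast_zero, Nat.zero_le, Nat.sub_zero, true_and] at h
      rw [h]
      split_ifs <;> simp
    rw [List.map_congr_left hterm]
    exact corr_sum S T i
  -- the dash stage
  have hstep : (fun (st : List Int × Int) (d : Int) =>
      let dashes := if d - 1 < PySem.List.len T ∧ PySem.List.pyGetD T (d - 1) ' ' = '-'
                    then st.2 + 1 else st.2
      (PySem.List.pySetD st.1 d (PySem.List.pyGetD st.1 d 0 + dashes), dashes)) = pvDashStep T := rfl
  have hres := dash_fold T score1 KN (by omega)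
  obtain ⟨hr1, -, hr3⟩ := hres
  show ((PySem.List.pyRange 1 ((KN:Int) + 1) 1).foldl (pvDashStep T) (score1, 0)).1 = _
  refine List.ext_getElem ?_ ?_
  · rw [hr1, hlen1, List.length_map, List.length_range, hT]
  · intro i h1 h2
    have hi : i < KN + 1 := by rw [hr1, hlen1] at h1; exact h1
    rw [← List.getD_eq_getElem _ 0 h1]
    rw [List.getElem_map, List.getElem_range]
    rw [hr3 i (by omega), hscore1 i hi]
    unfold pvRow
    by_cases h0 : 1 ≤ i
    · rw [if_pos ⟨h0, by omega⟩]; ring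
    · have : i = 0 := by omega
      subst this
      rw [if_neg (by omega)]
      simp

-- ===== VERDICT (by name: the statement is the Claim_ definition above) =====
theorem NumberOfMatch_spec : Claim_equal_NumberOfMatch := by
  intro A B M _ hM
  unfold Spec_NumberOfMatch NumberOfMatch NumberOfMatch_alt
  simp only [scoreList_eq, shiftedList_eq, shiftScores_eq _ _ _ hM]
  set s1 := (List.range (M + 1).toNat).map (fun k => pvRow A.toList B.toList k)
  set s2 := (List.range (M + 1).toNat).map (fun k => pvRow B.toList A.toList k)
  set m1 := (PySem.List.max? s1 (fun y => y)).getD 0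
  set m2 := (PySem.List.max? s2 (fun y => y)).getD 0
  by_cases h : m1 > m2
  · simp only [if_pos h]
    rw [max_eq_left (le_of_lt h)]
  · simp only [if_neg h]
    rw [max_eq_right (le_of_not_gt h)]
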